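-- pv_equiv track=rewrite | github.com/Jademagnin/103cipher | helpers/matrix.py | arr_to_matrix
-- ===== SOURCE A (Python) =====
-- def arr_to_matrix(arr, cols=None):
--     if (cols == None): cols = get_matrix_size_from_arr(arr)
--     matrix = []
--     for i in range(len(arr)):
--         if (i % cols == 0):
--             matrix.append([])
--         matrix[i // cols].append(arr[i])
--     if (len(arr) % cols != 0):
--         for i in range(cols - len(arr) % cols):
--             matrix[len(arr) // cols].append(0)
--     return matrix
--
-- def get_matrix_size_from_arr(arr):
--     size = 0
--     while (size * size < len(arr)):
--         size += 1
--     return size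
-- ===== SOURCE B (Python) =====
-- def get_matrix_size_from_arr(arr):
--     size = 0
--     while (size * size < len(arr)):
--         size += 1
--     return size
--
-- def arr_to_matrix(arr, cols=None):
--     if cols is None:
--         cols = get_matrix_size_from_arr(arr)
--     n = len(arr)
--     rows = -(-n // cols)
--     matrix = [list(arr[i * cols:(i + 1) * cols]) for i in range(rows)]
--     if matrix and len(matrix[-1]) < cols:
--         matrix[-1].extend([0] * (cols - len(matrix[-1])))
--     return matrix
-- ===== Notes on version B (the rewrite author's own statement) =====
-- stated objective: faster
-- what changed: B computes the row count by ceiling division and builds each row as one slice arr[i*cols:(i+1)*cols], padding only the last row, instead of A's per-element loop that appends into matrix[i//cols] and pads in a second loop.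
-- intended difference: For negative cols with nonempty arr, A returns rows assembled via Python's negative-index wraparound in matrix[i//cols] (e.g. [[1,2],[3]] for cols=-2), while B returns [] since the ceiling row count is non-positive; no rows is the intended reading of a non-positive column count. — e.g. on arr_to_matrix([1, 2, 3], some (-2)): A returns [[1, 2], [3]], B returns []
-- outside the precondition, e.g. on arr_to_matrix([], None): A raises ZeroDivisionError, B raises ZeroDivisionError
import Mathlib
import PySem

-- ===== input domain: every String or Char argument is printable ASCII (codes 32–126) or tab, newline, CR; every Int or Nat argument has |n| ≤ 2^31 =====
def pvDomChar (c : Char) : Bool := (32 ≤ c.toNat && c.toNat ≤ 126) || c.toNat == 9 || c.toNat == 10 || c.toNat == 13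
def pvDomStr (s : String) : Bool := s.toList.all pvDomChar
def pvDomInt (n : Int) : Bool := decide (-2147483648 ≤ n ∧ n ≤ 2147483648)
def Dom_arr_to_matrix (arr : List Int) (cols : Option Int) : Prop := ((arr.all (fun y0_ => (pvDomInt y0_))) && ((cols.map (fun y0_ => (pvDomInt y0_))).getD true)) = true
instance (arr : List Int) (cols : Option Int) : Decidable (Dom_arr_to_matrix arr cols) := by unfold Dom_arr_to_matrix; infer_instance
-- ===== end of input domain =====

-- B reshapes by slicing whole chunks and padding only the last row, instead of A's per-element append loop; equivalence is
-- proved for positive column counts, with the negative-cols corner (where A relies on negative-index wraparound) stated as D_.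

-- ===== PORT A =====
-- helper get_matrix_size_from_arr (identical in both Python files): while size*size < len(arr): size += 1
def sizeLoop (n size : Nat) : Nat :=
  if h : size * size < n then sizeLoop n (size + 1) else size
termination_by n - size
decreasing_by
  have hs : size ≤ size * size := Nat.le_mul_self size
  omega

def get_matrix_size_from_arr (arr : List Int) : Int := (sizeLoop arr.length 0 : Int)

-- 'if (cols == None): cols = get_matrix_size_from_arr(arr)' — identical first line of A and B
def resolveCols (arr : List Int) (cols : Option Int) : Int :=
  match cols with
  | none => get_matrix_size_from_arr arr
  | some c => c

-- matrix[i].append(x): Python list indexing with negative-index wraparound; an out-of-range index never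
-- occurs in the loops below (Python would raise IndexError there), so the no-op default is unreachable.
def pyAppendAt (m : List (List Int)) (i : Int) (x : Int) : List (List Int) :=
  let j := if i < 0 then i + m.length else i
  m.modify j.toNat (fun r => r ++ [x])

-- loop body: if (i % cols == 0): matrix.append([]); matrix[i // cols].append(arr[i])
def aStep (arr : List Int) (c : Int) (m : List (List Int)) (i : Nat) : List (List Int) :=
  let m' := if PySem.Int.mod (i : Int) c = 0 then m ++ [[]] else m
  pyAppendAt m' (PySem.Int.floordiv (i : Int) c) (PySem.List.pyGetD arr (i : Int) 0)

def aGo (arr : List Int) (c : Int) : List (List Int) :=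
  let n : Int := (arr.length : Int)
  let m := (List.range arr.length).foldl (aStep arr c) []
  if PySem.Int.mod n c ≠ 0 then
    (PySem.List.pyRange 0 (c - PySem.Int.mod n c) 1).foldl
      (fun m _ => pyAppendAt m (PySem.Int.floordiv n c) 0) m
  else m

def arr_to_matrix (arr : List Int) (cols : Option Int) : List (List Int) :=
  aGo arr (resolveCols arr cols)

-- ===== PORT B =====
-- rows = -(-n // cols); matrix = [list(arr[i*cols:(i+1)*cols]) for i in range(rows)]; pad the last row with zeros
def bGo (arr : List Int) (c : Int) : List (List Int) :=
  let n : Int := (arr.length : Int)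
  let rows : Int := -(PySem.Int.floordiv (-n) c)
  let matrix := (PySem.List.pyRange 0 rows 1).map
    (fun i => PySem.List.slice arr (some (i * c)) (some ((i + 1) * c)))
  match matrix.getLast? with
  | none => matrix
  | some last =>
      if (last.length : Int) < c then
        matrix.dropLast ++ [last ++ List.replicate (c - (last.length : Int)).toNat 0]
      else matrix

def arr_to_matrix_alt (arr : List Int) (cols : Option Int) : List (List Int) :=
  bGo arr (resolveCols arr cols)

-- ===== PRECONDITION & SPEC =====
-- Pre_ excludes exactly the inputs where A raises ZeroDivisionError: cols == 0, and cols == None with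
-- an empty arr (the computed default size is then 0).
def Pre_arr_to_matrix (arr : List Int) (cols : Option Int) : Prop :=
  cols ≠ some 0 ∧ (cols = none → arr ≠ [])
instance (arr : List Int) (cols : Option Int) : Decidable (Pre_arr_to_matrix arr cols) := by
  unfold Pre_arr_to_matrix; infer_instance

def pvWitness_arr_to_matrix : List Int × Option Int := ([1, 2, 3, 4, 5], some 2)

-- For negative cols and nonempty arr, A assembles rows through Python's negative-index wraparound in
-- matrix[i // cols] (e.g. [[1, 2], [3]] for cols = -2); B returns [] (a non-positive row count yields no
-- rows), the intended reading of a non-positive column count.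
def D_arr_to_matrix (arr : List Int) (cols : Option Int) : Prop :=
  cols.getD 1 < 0 ∧ arr ≠ []
instance (arr : List Int) (cols : Option Int) : Decidable (D_arr_to_matrix arr cols) := by
  unfold D_arr_to_matrix; infer_instance

def Spec_arr_to_matrix (arr : List Int) (cols : Option Int) (out : List (List Int)) : Prop :=
  ¬ D_arr_to_matrix arr cols → out = arr_to_matrix_alt arr cols
instance (arr : List Int) (cols : Option Int) (out : List (List Int)) : Decidable (Spec_arr_to_matrix arr cols out) := by
  unfold Spec_arr_to_matrix; infer_instance

def pvDiffWitness_arr_to_matrix : List Int × Option Int := ([1, 2, 3], some (-2))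
def pvDiffWitnessOut_arr_to_matrix : (List (List Int)) × (List (List Int)) := ([[1, 2], [3]], [])

-- ===== CLAIM (what is proved, stated in full; the proofs are below) =====
def Claim_unchanged_arr_to_matrix : Prop := ∀ (arr : List Int) (cols : Option Int), Dom_arr_to_matrix arr cols → Pre_arr_to_matrix arr cols → Spec_arr_to_matrix arr cols (arr_to_matrix arr cols)
def Claim_changed_arr_to_matrix : Prop := Dom_arr_to_matrix (pvDiffWitness_arr_to_matrix.1) (pvDiffWitness_arr_to_matrix.2) ∧ Pre_arr_to_matrix (pvDiffWitness_arr_to_matrix.1) (pvDiffWitness_arr_to_matrix.2) ∧ D_arr_to_matrix (pvDiffWitness_arr_to_matrix.1) (pvDiffWitness_arr_to_matrix.2) ∧ arr_to_matrix (pvDiffWitness_arr_to_matrix.1) (pvDiffWitness_arr_to_matrix.2) = pvDiffWitnessOut_arr_to_matrix.1 ∧ arr_to_matrix_alt (pvDiffWitness_arr_to_matrix.1) (pvDiffWitness_arr_to_matrix.2) = pvDiffWitnessOut_arr_to_matrix.2 ∧ pvDiffWitnessOut_arr_to_matrix.1 ≠ pvDiffWitnessOut_arr_to_matrix.2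
def Claim_exact_arr_to_matrix : Prop := ∀ (arr : List Int) (cols : Option Int), Dom_arr_to_matrix arr cols → Pre_arr_to_matrix arr cols → D_arr_to_matrix arr cols → arr_to_matrix arr cols ≠ arr_to_matrix_alt arr cols

-- ===== LEMMAS AND PROOFS =====

-- canonical form of both programs' intermediate state: after consuming i elements the matrix holds
-- ceil(i/k) rows, row r being the chunk of arr starting at r*k, cut off at position i
def rowF (arr : List Int) (k i r : Nat) : List Int :=
  (arr.drop (r * k)).take (min k (i - r * k))
def stateF (arr : List Int) (k i : Nat) : List (List Int) :=
  (List.range ((i + k - 1) / k)).map (rowF arr k i)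

lemma modify_concat (l : List (List Int)) (a : List Int) (f : List Int → List Int) :
    (l ++ [a]).modify l.length f = l ++ [f a] := by
  induction l with
  | nil => rfl
  | cons x t ih => simpa [List.modify_succ_cons] using ih

lemma pyAppendAt_nat (m : List (List Int)) (q : Nat) (x : Int) :
    pyAppendAt m (q : Int) x = m.modify q (fun r => r ++ [x]) := by
  have h : ¬((q : Int) < 0) := by omega
  simp [pyAppendAt, h]

lemma pyAppendAt_concat (front : List (List Int)) (lastRow : List Int) (x : Int) :
    pyAppendAt (front ++ [lastRow]) (front.length : Int) x = front ++ [lastRow ++ [x]] := by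
  rw [pyAppendAt_nat, modify_concat]

lemma length_pyAppendAt (m : List (List Int)) (i x : Int) :
    (pyAppendAt m i x).length = m.length := by
  simp [pyAppendAt]

lemma foldA_eq (arr : List Int) (k : Nat) (hk : 0 < k) :
    ∀ i, i ≤ arr.length → (List.range i).foldl (aStep arr (k : Int)) [] = stateF arr k i := by
  intro i
  induction i with
  | zero =>
      intro _
      simp [stateF, Nat.div_eq_of_lt (show k - 1 < k by omega)]
  | succ i ih =>
      intro hle
      have hi : i < arr.length := by omega
      rw [List.range_succ, List.foldl_append, ih (by omega)]
      simp only [List.foldl_cons, List.foldl_nil]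
      have hdm : k * (i / k) + i % k = i := Nat.div_add_mod i k
      set q := i / k with hq
      set r := i % k with hr
      have hrk : r < k := Nat.mod_lt i hk
      have hmod : PySem.Int.mod (i : Int) (k : Int) = ((r : Nat) : Int) :=
        PySem.Int.mod_natCast i k
      have hdiv : PySem.Int.floordiv (i : Int) (k : Int) = ((q : Nat) : Int) :=
        PySem.Int.floordiv_natCast i k
      have hget : PySem.List.pyGetD arr (i : Int) 0 = arr[i] := by
        rw [PySem.List.pyGetD_natCast]; exact List.getD_eq_getElem arr 0 hi
      by_cases hr0 : r = 0
      · -- i is a multiple of k: a fresh row is opened and arr[i] goes into it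
        have hik : i = k * q := by omega
        have rows_i : (i + k - 1) / k = q := by
          rw [show i + k - 1 = (k - 1) + k * q by omega, Nat.add_mul_div_left _ _ hk,
            Nat.div_eq_of_lt (show k - 1 < k by omega)]
          omega
        have rows_i1 : (i + 1 + k - 1) / k = q + 1 := by
          have e : k * (q + 1) = k * q + k := by ring
          rw [show i + 1 + k - 1 = k * (q + 1) by omega, Nat.mul_div_cancel_left _ hk]
        simp only [aStep, hmod, hdiv, hget]
        rw [if_pos (by exact_mod_cast congrArg (Nat.cast : Nat → Int) hr0)]
        have hlen : (stateF arr k i).length = q := by simp [stateF, rows_i]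
        rw [show ((q : Nat) : Int) = ((stateF arr k i).length : Int) by rw [hlen],
          pyAppendAt_concat]
        simp only [List.nil_append, stateF]
        rw [rows_i, rows_i1, List.range_succ, List.map_append]
        congr 1
        · apply List.map_congr_left
          intro rr hrr
          rw [List.mem_range] at hrr
          have t2 : rr * k + k ≤ k * q := by
            have t1 : (rr + 1) * k ≤ q * k := Nat.mul_le_mul_right k (by omega)
            have e1 : (rr + 1) * k = rr * k + k := by ring
            have e2 : q * k = k * q := by ring
            omega
          unfold rowF
          rw [show min k (i - rr * k) = min k (i + 1 - rr * k) by omega]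
        · simp only [List.map_cons, List.map_nil]
          unfold rowF
          have hqk : q * k = i := by rw [Nat.mul_comm]; omega
          rw [hqk, show i + 1 - i = 1 by omega, Nat.min_eq_right (by omega),
            List.drop_eq_getElem_cons hi]
          rfl
      · -- i continues the current (partial) last row
        have hrpos : 0 < r := Nat.pos_of_ne_zero hr0
        have hd1 : (r + k - 1) / k = 1 := Nat.div_eq_of_lt_le (k := 1) (n := k) (by omega) (by omega)
        have hd2 : (r + k) / k = 1 := Nat.div_eq_of_lt_le (k := 1) (n := k) (by omega) (by omega)
        have rows_i : (i + k - 1) / k = q + 1 := by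
          rw [show i + k - 1 = (r + k - 1) + k * q by omega, Nat.add_mul_div_left _ _ hk, hd1]
          omega
        have rows_i1 : (i + 1 + k - 1) / k = q + 1 := by
          rw [show i + 1 + k - 1 = (r + k) + k * q by omega, Nat.add_mul_div_left _ _ hk, hd2]
          omega
        simp only [aStep, hmod, hdiv, hget]
        rw [if_neg (by simpa using hr0)]
        simp only [stateF]
        rw [rows_i, List.range_succ, List.map_append]
        simp only [List.map_cons, List.map_nil]
        have hflen : (((List.range q).map (rowF arr k i))).length = q := by simp
        rw [show ((q : Nat) : Int) = ((((List.range q).map (rowF arr k i))).length : Int) by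
          rw [hflen], pyAppendAt_concat]
        rw [rows_i1, List.range_succ, List.map_append]
        simp only [List.map_cons, List.map_nil]
        have hdm' : q * k + r = i := by rw [Nat.mul_comm]; omega
        congr 1
        · apply List.map_congr_left
          intro rr hrr
          rw [List.mem_range] at hrr
          have t2 : rr * k + k ≤ k * q := by
            have t1 : (rr + 1) * k ≤ q * k := Nat.mul_le_mul_right k (by omega)
            have e1 : (rr + 1) * k = rr * k + k := by ring
            have e2 : q * k = k * q := by ring
            omega
          unfold rowF
          rw [show min k (i - rr * k) = min k (i + 1 - rr * k) by omega]
        · unfold rowF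
          rw [show min k (i - q * k) = r by omega, show min k (i + 1 - q * k) = r + 1 by omega,
            List.take_add_one]
          have hget2 : (arr.drop (q * k))[r]? = some arr[i] := by
            rw [List.getElem?_drop, show q * k + r = i from hdm', List.getElem?_eq_getElem hi]
          rw [hget2]
          rfl

lemma padLoop (u : Nat) (front : List (List Int)) (lastRow : List Int) :
    (PySem.List.pyRange 0 (u : Int) 1).foldl
      (fun m _ => pyAppendAt m (front.length : Int) 0) (front ++ [lastRow])
      = front ++ [lastRow ++ List.replicate u 0] := by
  induction u with
  | zero => simp [PySem.List.pyRange_one_eq_nil]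
  | succ u ih =>
      rw [show ((u + 1 : Nat) : Int) = (u : Int) + 1 by push_cast; ring,
        PySem.List.pyRange_one_succ_right (by positivity), List.foldl_append]
      simp only [List.foldl_cons, List.foldl_nil, ih]
      rw [pyAppendAt_concat, List.append_assoc]
      simp [List.replicate_succ']

lemma go_eq_nil (c : Int) : aGo [] c = bGo [] c := by
  have h1 : PySem.Int.mod 0 c = 0 := by simp [PySem.Int.mod]
  have h2 : PySem.Int.floordiv 0 c = 0 := by simp [PySem.Int.floordiv]
  simp [aGo, bGo, h1, h2]

lemma go_eq (arr : List Int) (k : Nat) (hk : 0 < k) : aGo arr (k : Int) = bGo arr (k : Int) := by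
  have hdm := Nat.div_add_mod (arr.length + k - 1) k
  have hmlt : (arr.length + k - 1) % k < k := Nat.mod_lt _ hk
  have hdm' : ((arr.length + k - 1) / k) * k + (arr.length + k - 1) % k = arr.length + k - 1 := by
    rw [Nat.mul_comm]; exact hdm
  have h1 : arr.length ≤ ((arr.length + k - 1) / k) * k := by omega
  have h2 : ((arr.length + k - 1) / k) * k < arr.length + k := by omega
  have hrows : -(PySem.Int.floordiv (-(arr.length : Int)) (k : Int))
      = (((arr.length + k - 1) / k : Nat) : Int) := by
    rw [PySem.Int.neg_floordiv_neg_eq_iff_of_pos (by exact_mod_cast hk)]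
    constructor
    · have h2' : ((((arr.length + k - 1) / k) * k : Nat) : Int) < ((arr.length + k : Nat) : Int) := by
        exact_mod_cast h2
      push_cast at h2' ⊢
      linarith
    · exact_mod_cast h1
  have hmat : (PySem.List.pyRange 0 ((((arr.length + k - 1) / k : Nat) : Int)) 1).map
        (fun i => PySem.List.slice arr (some (i * (k : Int))) (some ((i + 1) * (k : Int))))
      = stateF arr k arr.length := by
    rw [PySem.List.pyRange_zero_nat, List.map_map, stateF]
    apply List.map_congr_left
    intro rr _
    show PySem.List.slice arr (some ((rr : Int) * k)) (some (((rr : Int) + 1) * k))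
        = rowF arr k arr.length rr
    rw [show ((rr : Int) * k) = ((rr * k : Nat) : Int) by push_cast; ring,
      show (((rr : Int) + 1) * k) = ((rr * k : Nat) : Int) + ((k : Nat) : Int) by push_cast; ring,
      PySem.List.slice_natCast_add]
    unfold rowF
    rw [List.take_eq_take_min, List.length_drop]
  rcases List.eq_nil_or_concat' arr with hnil | ⟨_, _, _⟩
  · rw [hnil]; exact go_eq_nil _
  · have hpos : 0 < arr.length := by subst_eqs; simp
    have hc1 : 0 < (arr.length + k - 1) / k := Nat.div_pos (by omega) hk
    obtain ⟨cm1, hcm⟩ : ∃ m, (arr.length + k - 1) / k = m + 1 :=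
      ⟨(arr.length + k - 1) / k - 1, by omega⟩
    have hstate : stateF arr k arr.length
        = (List.range cm1).map (rowF arr k arr.length) ++ [rowF arr k arr.length cm1] := by
      rw [stateF, hcm, List.range_succ, List.map_append, List.map_cons, List.map_nil]
    have hfrontlen : ((List.range cm1).map (rowF arr k arr.length)).length = cm1 := by simp
    have hlast : (rowF arr k arr.length cm1).length = min k (arr.length - cm1 * k) := by
      show (List.take (min k (arr.length - cm1 * k)) (List.drop (cm1 * k) arr)).length
          = min k (arr.length - cm1 * k)
      rw [List.length_take, List.length_drop]
      omega
    have e : ((arr.length + k - 1) / k) * k = cm1 * k + k := by rw [hcm]; ring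
    have hq := Nat.div_add_mod arr.length k
    by_cases hr0 : arr.length % k = 0
    · -- arr.length is a multiple of k: neither program pads
      have hceq : (arr.length + k - 1) / k = arr.length / k := by
        rw [show arr.length + k - 1 = (k - 1) + k * (arr.length / k) by omega,
          Nat.add_mul_div_left _ _ hk, Nat.div_eq_of_lt (by omega)]
        omega
      have hnk : arr.length = ((arr.length + k - 1) / k) * k := by
        rw [hceq, Nat.mul_comm]; omega
      have hlastlen : (rowF arr k arr.length cm1).length = k := by rw [hlast]; omega
      simp only [aGo, bGo]
      rw [foldA_eq arr k hk _ le_rfl, hrows, hmat, PySem.Int.mod_natCast, hr0]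
      rw [hstate, List.getLast?_concat]
      simp only [hlastlen]
      rw [if_neg (by simp), if_neg (by simp)]
    · -- partial last row: A appends k - n%k zeros, B extends the last chunk
      have hrpos : 0 < arr.length % k := Nat.pos_of_ne_zero hr0
      have hrk : arr.length % k < k := Nat.mod_lt arr.length hk
      have hceq : (arr.length + k - 1) / k = arr.length / k + 1 := by
        rw [show arr.length + k - 1 = ((arr.length % k) + k - 1) + k * (arr.length / k) by omega,
          Nat.add_mul_div_left _ _ hk,
          Nat.div_eq_of_lt_le (k := 1) (n := k) (by omega) (by omega)]
        omega
      have hcm1 : cm1 = arr.length / k := by omega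
      have hrem : arr.length - cm1 * k = arr.length % k := by
        have : k * (arr.length / k) = (arr.length / k) * k := Nat.mul_comm _ _
        rw [hcm1]; omega
      have hlastlen : (rowF arr k arr.length cm1).length = arr.length % k := by
        rw [hlast, hrem]; omega
      simp only [aGo, bGo]
      rw [foldA_eq arr k hk _ le_rfl, hrows, hmat, PySem.Int.mod_natCast, PySem.Int.floordiv_natCast]
      rw [hstate, List.getLast?_concat]
      simp only [hlastlen]
      rw [if_pos (show ¬((((arr.length % k : Nat) : Int)) = 0) from fun h => hr0 (by exact_mod_cast h)),
        if_pos (by exact_mod_cast Nat.mod_lt arr.length hk)]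
      rw [List.dropLast_concat]
      rw [show ((k : Int) - ((arr.length % k : Nat) : Int)) = ((k - arr.length % k : Nat) : Int) by
        push_cast [Nat.cast_sub (le_of_lt hmlt)]; omega]
      rw [show ((arr.length / k : Nat) : Int) = (((List.range cm1).map (rowF arr k arr.length)).length : Int) by
        rw [hfrontlen, hcm1]]
      rw [padLoop, Int.toNat_natCast]

lemma sizeLoop_ge (n : Nat) : ∀ s, s ≤ sizeLoop n s := by
  intro s
  fun_induction sizeLoop n s <;> omega

lemma bGo_neg (arr : List Int) (c : Int) (hc : c < 0) : bGo arr c = [] := by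
  have hd := PySem.Int.floordiv_mul_add_mod (-(arr.length : Int)) c
  have hb := PySem.Int.mod_neg_bounds (-(arr.length : Int)) hc
  have hq : 0 ≤ PySem.Int.floordiv (-(arr.length : Int)) c := by
    by_contra h
    rw [Int.not_le] at h
    have h1 : 0 ≤ (PySem.Int.floordiv (-(arr.length : Int)) c + 1) * c := by
      have := mul_nonneg (a := -(PySem.Int.floordiv (-(arr.length : Int)) c + 1)) (b := -c)
        (by omega) (by omega)
      nlinarith [this]
    have h2 : (PySem.Int.floordiv (-(arr.length : Int)) c + 1) * c
        = PySem.Int.floordiv (-(arr.length : Int)) c * c + c := by ring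
    have h3 : (0 : Int) ≤ (arr.length : Int) := Int.natCast_nonneg _
    omega
  simp only [bGo]
  rw [PySem.List.pyRange_one_eq_nil (by omega)]
  simp

lemma foldA_len (arr : List Int) (c : Int) :
    ∀ (l : List Nat) (m : List (List Int)), m.length ≤ (l.foldl (aStep arr c) m).length := by
  intro l
  induction l with
  | nil => intro m; simp
  | cons x t ih =>
      intro m
      rw [List.foldl_cons]
      refine le_trans ?_ (ih _)
      simp only [aStep]
      rw [length_pyAppendAt]
      split_ifs <;> simp

lemma padFold_len (j : Int) (l : List Int) :
    ∀ m, (l.foldl (fun m _ => pyAppendAt m j 0) m).length = m.length := by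
  induction l with
  | nil => intro m; rfl
  | cons x t ih => intro m; rw [List.foldl_cons, ih, length_pyAppendAt]

lemma aGo_ne_nil (arr : List Int) (c : Int) (harr : arr ≠ []) : aGo arr c ≠ [] := by
  have hmain : 0 < ((List.range arr.length).foldl (aStep arr c) []).length := by
    obtain ⟨a, t, rfl⟩ : ∃ a t, arr = a :: t := by
      cases arr with
      | nil => simp at harr
      | cons a t => exact ⟨a, t, rfl⟩
    rw [show (a :: t).length = t.length + 1 from rfl, List.range_succ_eq_map, List.foldl_cons]
    refine lt_of_lt_of_le ?_ (foldA_len _ _ _ _)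
    have h1 : PySem.Int.mod 0 c = 0 := by simp [PySem.Int.mod]
    simp [aStep, length_pyAppendAt, h1]
  intro hnil
  have hlen : (aGo arr c).length = 0 := by rw [hnil]; rfl
  simp only [aGo] at hlen
  split_ifs at hlen with h
  · rw [padFold_len] at hlen
    omega
  · omega

-- ===== VERDICT (by name: the statement is the Claim_ definition above) =====
theorem arr_to_matrix_spec : Claim_unchanged_arr_to_matrix := by
  intro arr cols _ hpre hnd
  obtain ⟨h0, hnone⟩ := hpre
  unfold arr_to_matrix arr_to_matrix_alt
  match cols with
  | none =>
      have harr := hnone rfl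
      have hn : 0 < arr.length := List.length_pos_iff.mpr harr
      have hs : 0 < sizeLoop arr.length 0 := by
        rw [sizeLoop]; simp only [Nat.zero_mul]
        rw [dif_pos hn]
        exact lt_of_lt_of_le Nat.one_pos (sizeLoop_ge _ _)
      simpa [resolveCols, get_matrix_size_from_arr] using go_eq arr (sizeLoop arr.length 0) hs
  | some c =>
      have hc0 : c ≠ 0 := fun h => h0 (by rw [h])
      rcases lt_or_gt_of_ne hc0 with hneg | hpos
      · have harr : arr = [] := by
          by_contra hne
          exact hnd ⟨by simpa [D_arr_to_matrix] using hneg, hne⟩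
        subst harr
        simpa [resolveCols] using go_eq_nil c
      · have hk : 0 < c.toNat := by omega
        have hcast : ((c.toNat : Nat) : Int) = c := Int.toNat_of_nonneg (le_of_lt hpos)
        have := go_eq arr c.toNat hk
        rw [hcast] at this
        simpa [resolveCols] using this

theorem arr_to_matrix_changed : Claim_changed_arr_to_matrix := by
  unfold Claim_changed_arr_to_matrix; decide

theorem arr_to_matrix_tight : Claim_exact_arr_to_matrix := by
  intro arr cols _ _ hd
  obtain ⟨hneg, harr⟩ := hd
  match cols with
  | none => simp at hneg
  | some c =>
      have hc : c < 0 := by simpa using hneg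
      unfold arr_to_matrix arr_to_matrix_alt
      simp only [resolveCols]
      rw [bGo_neg arr c hc]
      exact aGo_ne_nil arr c harr
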